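-- pv_equiv track=rewrite | github.com/SetaShinsuke/util_scripts | MangaCrawler/A_Site_General/crwaler_general.py | findVol
-- ===== SOURCE A (Python) =====
-- def findVol(_chpIndex, _volHeads):
--     vol = 0
--     _volHeads.sort()
--     for head in _volHeads:
--         if (_chpIndex >= head):
--             vol += 1
--         else:
--             return vol
-- ===== SOURCE B (Python) =====
-- def findVol(_chpIndex, _volHeads):
--     # Sort in place (same observable mutation as the original), then binary-search
--     # for the insertion point of _chpIndex instead of scanning linearly.
--     _volHeads.sort()
--     lo, hi = 0, len(_volHeads)
--     while lo < hi:
--         mid = (lo + hi) // 2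
--         if _volHeads[mid] <= _chpIndex:
--             lo = mid + 1
--         else:
--             hi = mid
--     if lo < len(_volHeads):
--         return lo
--     return None
-- ===== Notes on version B (the rewrite author's own statement) =====
-- stated objective: alternative
-- what changed: Replaces the linear scan-until-larger counting loop with a hand-written binary search (bisect_right style) over the sorted list; returns the insertion point when some head exceeds the index, None otherwise.
import Mathlib
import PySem

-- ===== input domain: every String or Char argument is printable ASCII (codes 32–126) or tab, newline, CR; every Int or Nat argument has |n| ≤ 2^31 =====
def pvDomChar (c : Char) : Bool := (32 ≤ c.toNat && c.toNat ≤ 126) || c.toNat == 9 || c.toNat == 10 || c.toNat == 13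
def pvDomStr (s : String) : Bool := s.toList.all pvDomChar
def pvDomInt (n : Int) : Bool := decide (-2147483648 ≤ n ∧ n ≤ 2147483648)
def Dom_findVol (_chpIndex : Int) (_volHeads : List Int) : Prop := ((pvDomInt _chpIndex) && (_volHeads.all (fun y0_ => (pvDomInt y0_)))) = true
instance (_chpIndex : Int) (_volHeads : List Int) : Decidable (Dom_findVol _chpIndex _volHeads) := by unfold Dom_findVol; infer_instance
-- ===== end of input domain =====

-- B replaces A's linear scan after the sort by a binary search for the insertion
-- point; both Pythons sort the argument in place, and the equivalence proved here
-- is about the RETURN value (the mutation is identical in both).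

-- ===== PORT A =====
-- the for-loop with early return: count while _chpIndex >= head, return vol at the
-- first larger head; falling off the end returns None
def findVolLoop (c : Int) : List Int → Int → Option Int
  | [], _ => none
  | h :: t, vol => if c ≥ h then findVolLoop c t (vol + 1) else some vol

def findVol (_chpIndex : Int) (_volHeads : List Int) : Option Int :=
  findVolLoop _chpIndex (PySem.List.sorted _volHeads (fun x => x)) 0

-- ===== PORT B =====
-- Source B's while-loop binary search on indices lo..hi
def bsr (c : Int) (s : List Int) (lo hi : Nat) : Nat :=
  if lo < hi then
    let mid := (lo + hi) / 2
    if s.getD mid 0 ≤ c then bsr c s (mid + 1) hi else bsr c s lo mid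
  else lo
termination_by hi - lo
decreasing_by all_goals omega

def findVol_alt (_chpIndex : Int) (_volHeads : List Int) : Option Int :=
  let s := PySem.List.sorted _volHeads (fun x => x)
  let lo := bsr _chpIndex s 0 s.length
  if lo < s.length then some (lo : Int) else none

-- ===== PRECONDITION & SPEC =====
def Spec_findVol (_chpIndex : Int) (_volHeads : List Int) (out : Option Int) : Prop := out = findVol_alt _chpIndex _volHeads
instance (_chpIndex : Int) (_volHeads : List Int) (out : Option Int) : Decidable (Spec_findVol _chpIndex _volHeads out) := by unfold Spec_findVol; infer_instance

-- ===== CLAIM (what is proved, stated in full; the proofs are below) =====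
def Claim_equal_findVol : Prop := ∀ (_chpIndex : Int) (_volHeads : List Int), Dom_findVol _chpIndex _volHeads → Spec_findVol _chpIndex _volHeads (findVol _chpIndex _volHeads)

-- ===== LEMMAS AND PROOFS =====

-- If the first r positions satisfy (· ≤ c) and the rest do not, the countP is r.
theorem countP_of_split (c : Int) (s : List Int) (r : Nat) (hr : r ≤ s.length)
    (h1 : ∀ i (hi : i < s.length), i < r → s[i] ≤ c)
    (h2 : ∀ i (hi : i < s.length), r ≤ i → c < s[i]) :
    s.countP (fun x => decide (x ≤ c)) = r := by
  induction s generalizing r with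
  | nil => simpa using (Nat.le_zero.mp hr).symm
  | cons h t ih =>
    cases r with
    | zero =>
      rw [List.countP_eq_zero]
      intro a ha
      rcases List.mem_iff_getElem.mp ha with ⟨i, hi, rfl⟩
      simp only [decide_eq_true_eq, not_le]
      exact h2 i hi (Nat.zero_le _)
    | succ r' =>
      have hh : h ≤ c := h1 0 (by simp) (Nat.succ_pos _)
      rw [List.countP_cons_of_pos (p := fun x => decide (x ≤ c)) (by simpa using hh)]
      have := ih r' (by simpa using Nat.succ_le_succ_iff.mp (by simpa using hr))
        (fun i hi hlt => by simpa using h1 (i+1) (by simpa using Nat.succ_lt_succ hi) (Nat.succ_lt_succ hlt))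
        (fun i hi hge => by simpa using h2 (i+1) (by simpa using Nat.succ_lt_succ hi) (Nat.succ_le_succ hge))
      omega

-- A's loop on a ≤-sorted list returns (if k < len then some (v+k) else none), k = countP (≤ c).
theorem findVolLoop_eq (c : Int) (s : List Int) (hp : s.Pairwise (· ≤ ·)) (v : Int) :
    findVolLoop c s v =
      if s.countP (fun x => decide (x ≤ c)) < s.length
      then some (v + (s.countP (fun x => decide (x ≤ c)) : Int)) else none := by
  induction s generalizing v with
  | nil => simp [findVolLoop]
  | cons h t ih =>
    rcases List.pairwise_cons.mp hp with ⟨hht, hpt⟩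
    by_cases hc : c ≥ h
    · have hcnt : (h :: t).countP (fun x => decide (x ≤ c)) = t.countP (fun x => decide (x ≤ c)) + 1 :=
        List.countP_cons_of_pos (p := fun x => decide (x ≤ c)) (by simpa using hc)
      rw [findVolLoop, if_pos hc, ih hpt, hcnt]
      simp only [List.length_cons]
      split_ifs with h1 h2 h2 <;> first
        | (exfalso; omega)
        | rfl
        | (congr 1; push_cast; ring)
    · have hcnt : (h :: t).countP (fun x => decide (x ≤ c)) = 0 := by
        rw [List.countP_eq_zero]
        intro a ha
        rcases List.mem_cons.mp ha with rfl | ha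
        · simpa using hc
        · have : h ≤ a := hht a ha
          simp only [decide_eq_true_eq]
          omega
      rw [findVolLoop, if_neg hc, hcnt]
      simp

-- B's binary search, under its loop invariants, lands on countP (≤ c).
theorem bsr_eq (c : Int) (s : List Int) (hp : s.Pairwise (· ≤ ·)) :
    ∀ (n lo hi : Nat), hi - lo ≤ n → lo ≤ hi → hi ≤ s.length →
    (∀ i (hi' : i < s.length), i < lo → s[i] ≤ c) →
    (∀ i (hi' : i < s.length), hi ≤ i → c < s[i]) →
    bsr c s lo hi = s.countP (fun x => decide (x ≤ c)) := by
  have hmono := List.pairwise_iff_getElem.mp hp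
  intro n
  induction n with
  | zero =>
    intro lo hi hn hlohi hhi h1 h2
    have : lo = hi := by omega
    subst this
    rw [bsr, if_neg (by omega)]
    exact (countP_of_split c s lo (le_trans hlohi hhi) h1
      (fun i hi' hge => h2 i hi' hge)).symm
  | succ n ih =>
    intro lo hi hn hlohi hhi h1 h2
    by_cases hlt : lo < hi
    · rw [bsr, if_pos hlt]
      have hmidlt : (lo + hi) / 2 < s.length := by omega
      have hget : s.getD ((lo + hi) / 2) 0 = s[(lo + hi) / 2] := List.getD_eq_getElem s 0 hmidlt
      by_cases hm : s.getD ((lo + hi) / 2) 0 ≤ c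
      · rw [if_pos hm]
        refine ih ((lo + hi) / 2 + 1) hi (by omega) (by omega) hhi ?_ h2
        intro i hi' hilt
        rcases Nat.lt_succ_iff_lt_or_eq.mp hilt with hi2 | rfl
        · exact le_trans (hmono i _ hi' hmidlt hi2) (hget ▸ hm)
        · exact hget ▸ hm
      · rw [if_neg hm]
        rw [not_le] at hm
        rw [hget] at hm
        refine ih lo ((lo + hi) / 2) (by omega) (by omega) (by omega) h1 ?_
        intro i hi' hge
        rcases Nat.lt_or_ge ((lo + hi) / 2) i with hi2 | hi2
        · exact lt_of_lt_of_le hm (hmono _ i hmidlt hi' hi2)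
        · have : i = (lo + hi) / 2 := by omega
          subst this; exact hm
    · rw [bsr, if_neg hlt]
      have : lo = hi := by omega
      subst this
      exact (countP_of_split c s lo (le_trans hlohi hhi) h1
        (fun i hi' hge => h2 i hi' hge)).symm

-- ===== VERDICT (by name: the statement is the Claim_ definition above) =====
theorem findVol_spec : Claim_equal_findVol := by
  intro c hs _
  unfold Spec_findVol findVol findVol_alt
  have hp : (PySem.List.sorted hs (fun x => x)).Pairwise (· ≤ ·) := by
    simpa using PySem.List.sorted_pairwise hs (fun x => x)
  set s := PySem.List.sorted hs (fun x => x) with hsdef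
  show _ = (if bsr c s 0 s.length < s.length then some ((bsr c s 0 s.length : Nat) : Int) else none)
  rw [findVolLoop_eq c s hp 0,
      bsr_eq c s hp s.length 0 s.length (by omega) (by omega) le_rfl
        (fun i hi' h => absurd h (Nat.not_lt_zero i))
        (fun i hi' h => absurd hi' (Nat.not_lt.mpr h))]
  split_ifs <;> simp
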